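-- pv_equiv track=rewrite | github.com/bovarysme/advent | 2017/day3.py | positions
-- ===== SOURCE A (Python) =====
-- from enum import Enum
--
-- class Direction(Enum):
--     RIGHT = 1
--     UP = 2
--     LEFT = 3
--     DOWN = 4
--
-- def update(direction, limit):
--     if direction == Direction.RIGHT:
--         direction = Direction.UP
--     elif direction == Direction.UP:
--         direction = Direction.LEFT
--         limit += 1
--     elif direction == Direction.LEFT:
--         direction = Direction.DOWN
--     else:
--         direction = Direction.RIGHT
--         limit += 1
--
--     return direction, limit
--
-- def positions(value):
--     direction = Direction.RIGHT
--     pos = [0, 0]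
--
--     limit = 1
--     traveled = 0
--
--     for _ in range(1, value):
--         if direction == Direction.RIGHT:
--             pos[0] += 1
--         elif direction == Direction.UP:
--             pos[1] += 1
--         elif direction == Direction.LEFT:
--             pos[0] -= 1
--         else:
--             pos[1] -= 1
--
--         yield pos[0], pos[1]
--
--         traveled += 1
--         if traveled >= limit:
--             direction, limit = update(direction, limit)
--             traveled = 0
-- ===== SOURCE B (Python) =====
-- def positions(value):
--     # Ring-arithmetic formulation: each yielded coordinate is computed by a
--     # closed-form formula from the step index m and its ring number r
--     # (ring r holds indices (2r-1)^2 <= m < (2r+1)^2); only the ring counter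
--     # is carried between iterations. No direction state, no position stepping.
--     r = 1
--     for m in range(1, value):
--         if m >= (2 * r + 1) ** 2:
--             r += 1
--         j = m - (2 * r - 1) ** 2
--         if j < 2 * r:
--             yield (r, j - r + 1)
--         elif j < 4 * r:
--             yield (3 * r - 1 - j, r)
--         elif j < 6 * r:
--             yield (-r, 5 * r - 1 - j)
--         else:
--             yield (j - 7 * r + 1, -r)
-- ===== Notes on version B (the rewrite author's own statement) =====
-- stated objective: alternative
-- what changed: Replaced the unit-step state machine (Direction enum, update() helper, traveled/limit counters, incremental x/y position) by a ring-arithmetic formulation: each yielded coordinate is computed by a closed-form formula from the step index m and its ring number r ((2r-1)^2 <= m < (2r+1)^2), with only the ring counter carried between iterations.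
import Mathlib
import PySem

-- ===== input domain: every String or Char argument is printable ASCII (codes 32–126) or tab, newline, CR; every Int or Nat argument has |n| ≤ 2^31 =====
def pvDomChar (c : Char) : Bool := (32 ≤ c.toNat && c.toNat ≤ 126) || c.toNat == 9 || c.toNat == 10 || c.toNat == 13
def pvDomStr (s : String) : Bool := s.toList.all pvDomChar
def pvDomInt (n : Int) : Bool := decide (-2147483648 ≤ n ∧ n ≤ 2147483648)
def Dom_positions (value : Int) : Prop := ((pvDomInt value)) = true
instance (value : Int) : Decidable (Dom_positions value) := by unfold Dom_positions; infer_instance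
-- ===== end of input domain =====

-- B replaces A's unit-step state machine (Direction enum, update() helper, traveled/limit
-- counters, incremental position) by ring arithmetic: each coordinate is computed by a
-- closed-form formula from the step index and its ring number; objective: alternative.
-- (A is a generator; equivalence is about the list of yielded pairs.)

-- ===== PORT A =====
inductive PyDir | RIGHT | UP | LEFT | DOWN
deriving DecidableEq, Repr

def pyUpdate : PyDir → Int → PyDir × Int
  | .RIGHT, limit => (.UP, limit)
  | .UP, limit => (.LEFT, limit + 1)
  | .LEFT, limit => (.DOWN, limit)
  | .DOWN, limit => (.RIGHT, limit + 1)

structure StateA where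
  dir : PyDir
  x : Int
  y : Int
  limit : Int
  traveled : Int
  acc : List (Int × Int)

def stepA (s : StateA) : StateA :=
  let p : Int × Int :=
    match s.dir with
    | .RIGHT => (s.x + 1, s.y)
    | .UP => (s.x, s.y + 1)
    | .LEFT => (s.x - 1, s.y)
    | .DOWN => (s.x, s.y - 1)
  let acc := s.acc ++ [p]
  let traveled := s.traveled + 1
  if traveled ≥ s.limit then
    let (dir, limit) := pyUpdate s.dir s.limit
    ⟨dir, p.1, p.2, limit, 0, acc⟩
  else
    ⟨s.dir, p.1, p.2, s.limit, traveled, acc⟩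

def positions (value : Int) : List (Int × Int) :=
  ((PySem.List.pyRange 1 value 1).foldl (fun s _ => stepA s)
    ⟨.RIGHT, 0, 0, 1, 0, []⟩).acc

-- ===== PORT B =====
-- Source B's four-way if on j = m - (2r-1)^2: which side of ring r index m lies on
def sideB (r j : Int) : Int × Int :=
  if j < 2 * r then (r, j - r + 1)
  else if j < 4 * r then (3 * r - 1 - j, r)
  else if j < 6 * r then (-r, 5 * r - 1 - j)
  else (j - 7 * r + 1, -r)

-- one loop iteration of Source B: update the ring counter, then emit the closed-form coordinate
def stepB (r m : Int) : Int × (Int × Int) :=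
  let r' := if m ≥ (2 * r + 1) ^ 2 then r + 1 else r
  (r', sideB r' (m - (2 * r' - 1) ^ 2))

def positions_alt (value : Int) : List (Int × Int) :=
  ((PySem.List.pyRange 1 value 1).foldl
    (fun (s : Int × List (Int × Int)) m => ((stepB s.1 m).1, s.2 ++ [(stepB s.1 m).2]))
    (1, [])).2

-- ===== PRECONDITION & SPEC =====
def Spec_positions (value : Int) (out : List (Int × Int)) : Prop := out = positions_alt value
instance (value : Int) (out : List (Int × Int)) : Decidable (Spec_positions value out) := by unfold Spec_positions; infer_instance

-- ===== CLAIM (what is proved, stated in full; the proofs are below) =====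
def Claim_equal_positions : Prop := ∀ (value : Int), Dom_positions value → Spec_positions value (positions value)

-- ===== LEMMAS AND PROOFS =====

-- A's loop, rephrased as structural recursion on the number of remaining iterations
def runA : Nat → PyDir → Int → Int → Int → Int → List (Int × Int)
  | 0, _, _, _, _, _ => []
  | n + 1, dir, x, y, limit, traveled =>
    let p : Int × Int :=
      match dir with
      | .RIGHT => (x + 1, y)
      | .UP => (x, y + 1)
      | .LEFT => (x - 1, y)
      | .DOWN => (x, y - 1)
    if traveled + 1 ≥ limit then
      p :: runA n (pyUpdate dir limit).1 p.1 p.2 (pyUpdate dir limit).2 0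
    else
      p :: runA n dir p.1 p.2 limit (traveled + 1)

theorem foldA_char (l : List Int) : ∀ (dir : PyDir) (x y limit traveled : Int)
    (acc : List (Int × Int)),
    (l.foldl (fun s _ => stepA s) ⟨dir, x, y, limit, traveled, acc⟩).acc
      = acc ++ runA l.length dir x y limit traveled := by
  induction l with
  | nil => intro dir x y limit traveled acc; simp [runA]
  | cons hd tl ih =>
    intro dir x y limit traveled acc
    rw [List.foldl_cons, ih]
    cases dir <;> by_cases h : limit ≤ traveled + 1 <;>
      simp [stepA, pyUpdate, runA, h]

theorem positions_char (value : Int) :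
    positions value = runA (value - 1).toNat PyDir.RIGHT 0 0 1 0 := by
  unfold positions
  rw [foldA_char, PySem.List.length_pyRange_one]
  simp

-- B's loop over an arbitrary list of indices, then over a contiguous range
def runBlist : List Int → Int → List (Int × Int)
  | [], _ => []
  | m :: t, r => (stepB r m).2 :: runBlist t (stepB r m).1

theorem foldB_char (l : List Int) : ∀ (r : Int) (acc : List (Int × Int)),
    (l.foldl (fun (s : Int × List (Int × Int)) m =>
        ((stepB s.1 m).1, s.2 ++ [(stepB s.1 m).2])) (r, acc)).2
      = acc ++ runBlist l r := by
  induction l with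
  | nil => intro r acc; simp [runBlist]
  | cons hd tl ih => intro r acc; rw [List.foldl_cons, ih]; simp [runBlist]

-- B's loop as structural recursion on the remaining count, index m explicit
def runB : Nat → Int → Int → List (Int × Int)
  | 0, _, _ => []
  | n + 1, r, m => (stepB r m).2 :: runB n (stepB r m).1 (m + 1)

theorem runBlist_range (n : Nat) : ∀ (a r : Int),
    runBlist (PySem.List.pyRange a (a + n) 1) r = runB n r a := by
  induction n with
  | zero =>
    intro a r
    rw [show a + ((0 : Nat) : Int) = a by push_cast; ring]
    rw [PySem.List.pyRange_one_eq_nil (le_refl a)]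
    rfl
  | succ n ih =>
    intro a r
    rw [PySem.List.pyRange_one_cons (by push_cast; omega)]
    simp only [runBlist, runB]
    rw [show a + ((n + 1 : Nat) : Int) = (a + 1) + (n : Int) by push_cast; ring]
    rw [ih]

theorem positions_alt_char (value : Int) :
    positions_alt value = runB (value - 1).toNat 1 1 := by
  unfold positions_alt
  rw [foldB_char]
  by_cases h : value ≤ 1
  · rw [PySem.List.pyRange_one_eq_nil h]
    rw [show (value - 1).toNat = 0 by omega]
    rfl
  · rw [show PySem.List.pyRange 1 value 1
        = PySem.List.pyRange 1 (1 + ((value - 1).toNat : Int)) 1 by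
      congr 1; omega]
    rw [runBlist_range]
    simp

-- closed-form A-state before performing step m = (2r-1)^2 + j of ring r (0 ≤ j < 8r)
def dirA (r j : Int) : PyDir :=
  if j = 0 then .RIGHT
  else if j ≤ 2 * r - 1 then .UP
  else if j < 4 * r then .LEFT
  else if j < 6 * r then .DOWN
  else .RIGHT

def limA (r j : Int) : Int :=
  if j ≤ 2 * r - 1 then 2 * r - 1 else if j < 6 * r then 2 * r else 2 * r + 1

def travA (r j : Int) : Int :=
  if j = 0 then 2 * r - 2
  else if j ≤ 2 * r - 1 then j - 1
  else if j < 4 * r then j - 2 * r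
  else if j < 6 * r then j - 4 * r
  else j - 6 * r

def posA (r j : Int) : Int × Int :=
  if j = 0 then (r - 1, -(r - 1)) else sideB r (j - 1)

-- B's carried ring counter before processing index m = (2r-1)^2 + j
def rpB (r j : Int) : Int := if j = 0 ∧ r ≠ 1 then r - 1 else r

theorem stepB_eq (r j : Int) (_hr : 1 ≤ r) (_hj0 : 0 ≤ j) (hj8 : j < 8 * r) :
    stepB (rpB r j) ((2 * r - 1) ^ 2 + j) = (r, sideB r j) := by
  have hsq : (2 * r + 1) ^ 2 = (2 * r - 1) ^ 2 + 8 * r := by ring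
  unfold stepB rpB
  by_cases h : j = 0 ∧ r ≠ 1
  · rw [if_pos h]
    have h2 : (2 * (r - 1) + 1) ^ 2 = (2 * r - 1) ^ 2 := by ring
    rw [if_pos (by rw [h2]; omega)]
    have e1 : r - 1 + 1 = r := by ring
    rw [e1]
    show (r, sideB r ((2 * r - 1) ^ 2 + j - (2 * r - 1) ^ 2)) = (r, sideB r j)
    rw [show (2 * r - 1) ^ 2 + j - (2 * r - 1) ^ 2 = j by ring]
  · rw [if_neg h]
    rw [if_neg (show ¬((2 * r - 1) ^ 2 + j ≥ (2 * r + 1) ^ 2) by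
      rw [hsq]; omega)]
    show (r, sideB r ((2 * r - 1) ^ 2 + j - (2 * r - 1) ^ 2)) = (r, sideB r j)
    rw [show (2 * r - 1) ^ 2 + j - (2 * r - 1) ^ 2 = j by ring]

theorem runAB (n : Nat) : ∀ (r j : Int), 1 ≤ r → 0 ≤ j → j < 8 * r →
    runA n (dirA r j) (posA r j).1 (posA r j).2 (limA r j) (travA r j)
      = runB n (rpB r j) ((2 * r - 1) ^ 2 + j) := by
  induction n with
  | zero => intro r j _ _ _; rfl
  | succ n ih =>
    intro r j hr hj0 hj8
    simp only [runB]
    by_cases h0 : j = 0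
    ·
      -- c1: j = 0 — last RIGHT step of the segment entering ring r; turn to UP
      have hd : dirA r j = PyDir.RIGHT := by unfold dirA; rw [if_pos h0]
      have hp : posA r j = (r - 1, -(r - 1)) := by
        unfold posA; rw [if_pos h0]
      have hp1 : (posA r j).1 = r - 1 := by rw [hp]
      have hp2 : (posA r j).2 = -(r - 1) := by rw [hp]
      have hl : limA r j = 2 * r - 1 := by unfold limA; rw [if_pos (by omega)]
      have ht : travA r j = 2 * r - 2 := by unfold travA; rw [if_pos h0]
      have hs : sideB r j = (r, j - r + 1) := by unfold sideB; rw [if_pos (by omega)]; try first | rfl | (simp only [Prod.mk.injEq]; try constructor; all_goals first | trivial | omega)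
      rw [hd, hp1, hp2, hl, ht]
      simp only [runA]
      rw [if_pos (by omega : 2 * r - 2 + 1 ≥ 2 * r - 1)]
      simp only [pyUpdate]
      rw [show (stepB (rpB r j) ((2 * r - 1) ^ 2 + j)).2 = sideB r j from by
            rw [stepB_eq r j hr hj0 hj8],
          show (stepB (rpB r j) ((2 * r - 1) ^ 2 + j)).1 = r from by
            rw [stepB_eq r j hr hj0 hj8],
          hs]
      refine congrArg₂ List.cons (by try first | rfl | (simp only [Prod.mk.injEq]; try constructor; all_goals first | trivial | omega)) ?_
      have H := ih r (j + 1) (by omega) (by omega) (by omega)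
      rw [show dirA r (j + 1) = PyDir.UP from by unfold dirA; rw [if_neg (by omega), if_pos (by omega)],
          show posA r (j + 1) = (r - 1 + 1, -(r - 1)) from by
            unfold posA; rw [if_neg (by omega)]; unfold sideB; rw [if_pos (by omega)]; first | rfl | (try first | rfl | (simp only [Prod.mk.injEq]; try constructor; all_goals first | trivial | omega)),
          show limA r (j + 1) = 2 * r - 1 from by unfold limA; rw [if_pos (by omega)],
          show travA r (j + 1) = 0 from by unfold travA; rw [if_neg (by omega), if_pos (by omega)]; omega,
          show rpB r (j + 1) = r from by unfold rpB; rw [if_neg (by omega)],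
          show (2 * r - 1) ^ 2 + (j + 1) = (2 * r - 1) ^ 2 + j + 1 from by ring] at H
      exact H
    ·
      by_cases h1 : j < 2 * r - 1
      ·
        -- c2: 1 ≤ j < 2r-1 — UP along the right column, no turn
        have hd : dirA r j = PyDir.UP := by unfold dirA; rw [if_neg h0, if_pos (by omega)]
        have hp : posA r j = (r, j - r) := by
          unfold posA; rw [if_neg (by omega)]; unfold sideB; rw [if_pos (by omega)]; try first | rfl | (simp only [Prod.mk.injEq]; try constructor; all_goals first | trivial | omega)
        have hp1 : (posA r j).1 = r := by rw [hp]
        have hp2 : (posA r j).2 = j - r := by rw [hp]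
        have hl : limA r j = 2 * r - 1 := by unfold limA; rw [if_pos (by omega)]
        have ht : travA r j = j - 1 := by unfold travA; rw [if_neg h0, if_pos (by omega)]
        have hs : sideB r j = (r, j - r + 1) := by unfold sideB; rw [if_pos (by omega)]
        rw [hd, hp1, hp2, hl, ht]
        simp only [runA]
        rw [if_neg (by omega : ¬ (j - 1 + 1 ≥ 2 * r - 1))]
        rw [show (stepB (rpB r j) ((2 * r - 1) ^ 2 + j)).2 = sideB r j from by
              rw [stepB_eq r j hr hj0 hj8],
            show (stepB (rpB r j) ((2 * r - 1) ^ 2 + j)).1 = r from by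
              rw [stepB_eq r j hr hj0 hj8],
            hs]
        refine congrArg₂ List.cons (by try first | rfl | (simp only [Prod.mk.injEq]; try constructor; all_goals first | trivial | omega)) ?_
        have H := ih r (j + 1) (by omega) (by omega) (by omega)
        rw [show dirA r (j + 1) = PyDir.UP from by unfold dirA; rw [if_neg (by omega), if_pos (by omega)],
            show posA r (j + 1) = (r, j - r + 1) from by
              unfold posA; rw [if_neg (by omega)]; unfold sideB; rw [if_pos (by omega)]; first | rfl | (try first | rfl | (simp only [Prod.mk.injEq]; try constructor; all_goals first | trivial | omega)),
            show limA r (j + 1) = 2 * r - 1 from by unfold limA; rw [if_pos (by omega)],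
            show travA r (j + 1) = j - 1 + 1 from by unfold travA; rw [if_neg (by omega), if_pos (by omega)]; omega,
            show rpB r (j + 1) = r from by unfold rpB; rw [if_neg (by omega)],
            show (2 * r - 1) ^ 2 + (j + 1) = (2 * r - 1) ^ 2 + j + 1 from by ring] at H
        exact H
      ·
        by_cases h2 : j = 2 * r - 1
        ·
          -- c3: j = 2r-1 — top of the right column; turn UP→LEFT, limit grows
          have hd : dirA r j = PyDir.UP := by unfold dirA; rw [if_neg h0, if_pos (by omega)]
          have hp : posA r j = (r, j - r) := by
            unfold posA; rw [if_neg (by omega)]; unfold sideB; rw [if_pos (by omega)]; try first | rfl | (simp only [Prod.mk.injEq]; try constructor; all_goals first | trivial | omega)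
          have hp1 : (posA r j).1 = r := by rw [hp]
          have hp2 : (posA r j).2 = j - r := by rw [hp]
          have hl : limA r j = 2 * r - 1 := by unfold limA; rw [if_pos (by omega)]
          have ht : travA r j = j - 1 := by unfold travA; rw [if_neg h0, if_pos (by omega)]
          have hs : sideB r j = (r, j - r + 1) := by unfold sideB; rw [if_pos (by omega)]
          rw [hd, hp1, hp2, hl, ht]
          simp only [runA]
          rw [if_pos (by omega : j - 1 + 1 ≥ 2 * r - 1)]
          simp only [pyUpdate]
          rw [show (stepB (rpB r j) ((2 * r - 1) ^ 2 + j)).2 = sideB r j from by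
                rw [stepB_eq r j hr hj0 hj8],
              show (stepB (rpB r j) ((2 * r - 1) ^ 2 + j)).1 = r from by
                rw [stepB_eq r j hr hj0 hj8],
              hs]
          refine congrArg₂ List.cons (by try first | rfl | (simp only [Prod.mk.injEq]; try constructor; all_goals first | trivial | omega)) ?_
          have H := ih r (j + 1) (by omega) (by omega) (by omega)
          rw [show dirA r (j + 1) = PyDir.LEFT from by unfold dirA; rw [if_neg (by omega), if_neg (by omega), if_pos (by omega)],
              show posA r (j + 1) = (r, j - r + 1) from by
                unfold posA; rw [if_neg (by omega)]; unfold sideB; rw [if_pos (by omega)]; first | rfl | (try first | rfl | (simp only [Prod.mk.injEq]; try constructor; all_goals first | trivial | omega)),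
              show limA r (j + 1) = 2 * r - 1 + 1 from by unfold limA; rw [if_neg (by omega), if_pos (by omega)]; omega,
              show travA r (j + 1) = 0 from by unfold travA; rw [if_neg (by omega), if_neg (by omega), if_pos (by omega)]; omega,
              show rpB r (j + 1) = r from by unfold rpB; rw [if_neg (by omega)],
              show (2 * r - 1) ^ 2 + (j + 1) = (2 * r - 1) ^ 2 + j + 1 from by ring] at H
          exact H
        ·
          by_cases h3 : j = 2 * r
          ·
            -- c4a: j = 2r — first LEFT step along the top row
            have hd : dirA r j = PyDir.LEFT := by unfold dirA; rw [if_neg h0, if_neg (by omega), if_pos (by omega)]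
            have hp : posA r j = (r, j - r) := by
              unfold posA; rw [if_neg (by omega)]; unfold sideB; rw [if_pos (by omega)]; try first | rfl | (simp only [Prod.mk.injEq]; try constructor; all_goals first | trivial | omega)
            have hp1 : (posA r j).1 = r := by rw [hp]
            have hp2 : (posA r j).2 = j - r := by rw [hp]
            have hl : limA r j = 2 * r := by unfold limA; rw [if_neg (by omega), if_pos (by omega)]
            have ht : travA r j = j - 2 * r := by unfold travA; rw [if_neg h0, if_neg (by omega), if_pos (by omega)]
            have hs : sideB r j = (3 * r - 1 - j, r) := by unfold sideB; rw [if_neg (by omega), if_pos (by omega)]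
            rw [hd, hp1, hp2, hl, ht]
            simp only [runA]
            rw [if_neg (by omega : ¬ (j - 2 * r + 1 ≥ 2 * r))]
            rw [show (stepB (rpB r j) ((2 * r - 1) ^ 2 + j)).2 = sideB r j from by
                  rw [stepB_eq r j hr hj0 hj8],
                show (stepB (rpB r j) ((2 * r - 1) ^ 2 + j)).1 = r from by
                  rw [stepB_eq r j hr hj0 hj8],
                hs]
            refine congrArg₂ List.cons (by try first | rfl | (simp only [Prod.mk.injEq]; try constructor; all_goals first | trivial | omega)) ?_
            have H := ih r (j + 1) (by omega) (by omega) (by omega)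
            rw [show dirA r (j + 1) = PyDir.LEFT from by unfold dirA; rw [if_neg (by omega), if_neg (by omega), if_pos (by omega)],
                show posA r (j + 1) = (r - 1, j - r) from by
                  unfold posA; rw [if_neg (by omega)]; unfold sideB; rw [if_neg (by omega), if_pos (by omega)]; first | rfl | (try first | rfl | (simp only [Prod.mk.injEq]; try constructor; all_goals first | trivial | omega)),
                show limA r (j + 1) = 2 * r from by unfold limA; rw [if_neg (by omega), if_pos (by omega)],
                show travA r (j + 1) = j - 2 * r + 1 from by unfold travA; rw [if_neg (by omega), if_neg (by omega), if_pos (by omega)]; omega,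
                show rpB r (j + 1) = r from by unfold rpB; rw [if_neg (by omega)],
                show (2 * r - 1) ^ 2 + (j + 1) = (2 * r - 1) ^ 2 + j + 1 from by ring] at H
            exact H
          ·
            by_cases h4 : j < 4 * r - 1
            ·
              -- c4b: 2r < j < 4r-1 — LEFT along the top row, no turn
              have hd : dirA r j = PyDir.LEFT := by unfold dirA; rw [if_neg h0, if_neg (by omega), if_pos (by omega)]
              have hp : posA r j = (3 * r - j, r) := by
                unfold posA; rw [if_neg (by omega)]; unfold sideB; rw [if_neg (by omega), if_pos (by omega)]; try first | rfl | (simp only [Prod.mk.injEq]; try constructor; all_goals first | trivial | omega)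
              have hp1 : (posA r j).1 = 3 * r - j := by rw [hp]
              have hp2 : (posA r j).2 = r := by rw [hp]
              have hl : limA r j = 2 * r := by unfold limA; rw [if_neg (by omega), if_pos (by omega)]
              have ht : travA r j = j - 2 * r := by unfold travA; rw [if_neg h0, if_neg (by omega), if_pos (by omega)]
              have hs : sideB r j = (3 * r - 1 - j, r) := by unfold sideB; rw [if_neg (by omega), if_pos (by omega)]
              rw [hd, hp1, hp2, hl, ht]
              simp only [runA]
              rw [if_neg (by omega : ¬ (j - 2 * r + 1 ≥ 2 * r))]
              rw [show (stepB (rpB r j) ((2 * r - 1) ^ 2 + j)).2 = sideB r j from by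
                    rw [stepB_eq r j hr hj0 hj8],
                  show (stepB (rpB r j) ((2 * r - 1) ^ 2 + j)).1 = r from by
                    rw [stepB_eq r j hr hj0 hj8],
                  hs]
              refine congrArg₂ List.cons (by try first | rfl | (simp only [Prod.mk.injEq]; try constructor; all_goals first | trivial | omega)) ?_
              have H := ih r (j + 1) (by omega) (by omega) (by omega)
              rw [show dirA r (j + 1) = PyDir.LEFT from by unfold dirA; rw [if_neg (by omega), if_neg (by omega), if_pos (by omega)],
                  show posA r (j + 1) = (3 * r - j - 1, r) from by
                    unfold posA; rw [if_neg (by omega)]; unfold sideB; rw [if_neg (by omega), if_pos (by omega)]; first | rfl | (try first | rfl | (simp only [Prod.mk.injEq]; try constructor; all_goals first | trivial | omega)),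
                  show limA r (j + 1) = 2 * r from by unfold limA; rw [if_neg (by omega), if_pos (by omega)],
                  show travA r (j + 1) = j - 2 * r + 1 from by unfold travA; rw [if_neg (by omega), if_neg (by omega), if_pos (by omega)]; omega,
                  show rpB r (j + 1) = r from by unfold rpB; rw [if_neg (by omega)],
                  show (2 * r - 1) ^ 2 + (j + 1) = (2 * r - 1) ^ 2 + j + 1 from by ring] at H
              exact H
            ·
              by_cases h5 : j = 4 * r - 1
              ·
                -- c5: j = 4r-1 — end of the top row; turn LEFT→DOWN
                have hd : dirA r j = PyDir.LEFT := by unfold dirA; rw [if_neg h0, if_neg (by omega), if_pos (by omega)]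
                have hp : posA r j = (3 * r - j, r) := by
                  unfold posA; rw [if_neg (by omega)]; unfold sideB; rw [if_neg (by omega), if_pos (by omega)]; try first | rfl | (simp only [Prod.mk.injEq]; try constructor; all_goals first | trivial | omega)
                have hp1 : (posA r j).1 = 3 * r - j := by rw [hp]
                have hp2 : (posA r j).2 = r := by rw [hp]
                have hl : limA r j = 2 * r := by unfold limA; rw [if_neg (by omega), if_pos (by omega)]
                have ht : travA r j = j - 2 * r := by unfold travA; rw [if_neg h0, if_neg (by omega), if_pos (by omega)]
                have hs : sideB r j = (3 * r - 1 - j, r) := by unfold sideB; rw [if_neg (by omega), if_pos (by omega)]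
                rw [hd, hp1, hp2, hl, ht]
                simp only [runA]
                rw [if_pos (by omega : j - 2 * r + 1 ≥ 2 * r)]
                simp only [pyUpdate]
                rw [show (stepB (rpB r j) ((2 * r - 1) ^ 2 + j)).2 = sideB r j from by
                      rw [stepB_eq r j hr hj0 hj8],
                    show (stepB (rpB r j) ((2 * r - 1) ^ 2 + j)).1 = r from by
                      rw [stepB_eq r j hr hj0 hj8],
                    hs]
                refine congrArg₂ List.cons (by try first | rfl | (simp only [Prod.mk.injEq]; try constructor; all_goals first | trivial | omega)) ?_
                have H := ih r (j + 1) (by omega) (by omega) (by omega)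
                rw [show dirA r (j + 1) = PyDir.DOWN from by unfold dirA; rw [if_neg (by omega), if_neg (by omega), if_neg (by omega), if_pos (by omega)],
                    show posA r (j + 1) = (3 * r - j - 1, r) from by
                      unfold posA; rw [if_neg (by omega)]; unfold sideB; rw [if_neg (by omega), if_pos (by omega)]; first | rfl | (try first | rfl | (simp only [Prod.mk.injEq]; try constructor; all_goals first | trivial | omega)),
                    show limA r (j + 1) = 2 * r from by unfold limA; rw [if_neg (by omega), if_pos (by omega)],
                    show travA r (j + 1) = 0 from by unfold travA; rw [if_neg (by omega), if_neg (by omega), if_neg (by omega), if_pos (by omega)]; omega,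
                    show rpB r (j + 1) = r from by unfold rpB; rw [if_neg (by omega)],
                    show (2 * r - 1) ^ 2 + (j + 1) = (2 * r - 1) ^ 2 + j + 1 from by ring] at H
                exact H
              ·
                by_cases h6 : j = 4 * r
                ·
                  -- c6a: j = 4r — first DOWN step along the left column
                  have hd : dirA r j = PyDir.DOWN := by unfold dirA; rw [if_neg h0, if_neg (by omega), if_neg (by omega), if_pos (by omega)]
                  have hp : posA r j = (3 * r - j, r) := by
                    unfold posA; rw [if_neg (by omega)]; unfold sideB; rw [if_neg (by omega), if_pos (by omega)]; try first | rfl | (simp only [Prod.mk.injEq]; try constructor; all_goals first | trivial | omega)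
                  have hp1 : (posA r j).1 = 3 * r - j := by rw [hp]
                  have hp2 : (posA r j).2 = r := by rw [hp]
                  have hl : limA r j = 2 * r := by unfold limA; rw [if_neg (by omega), if_pos (by omega)]
                  have ht : travA r j = j - 4 * r := by unfold travA; rw [if_neg h0, if_neg (by omega), if_neg (by omega), if_pos (by omega)]
                  have hs : sideB r j = (-r, 5 * r - 1 - j) := by unfold sideB; rw [if_neg (by omega), if_neg (by omega), if_pos (by omega)]
                  rw [hd, hp1, hp2, hl, ht]
                  simp only [runA]
                  rw [if_neg (by omega : ¬ (j - 4 * r + 1 ≥ 2 * r))]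
                  rw [show (stepB (rpB r j) ((2 * r - 1) ^ 2 + j)).2 = sideB r j from by
                        rw [stepB_eq r j hr hj0 hj8],
                      show (stepB (rpB r j) ((2 * r - 1) ^ 2 + j)).1 = r from by
                        rw [stepB_eq r j hr hj0 hj8],
                      hs]
                  refine congrArg₂ List.cons (by try first | rfl | (simp only [Prod.mk.injEq]; try constructor; all_goals first | trivial | omega)) ?_
                  have H := ih r (j + 1) (by omega) (by omega) (by omega)
                  rw [show dirA r (j + 1) = PyDir.DOWN from by unfold dirA; rw [if_neg (by omega), if_neg (by omega), if_neg (by omega), if_pos (by omega)],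
                      show posA r (j + 1) = (3 * r - j, r - 1) from by
                        unfold posA; rw [if_neg (by omega)]; unfold sideB; rw [if_neg (by omega), if_neg (by omega), if_pos (by omega)]; first | rfl | (try first | rfl | (simp only [Prod.mk.injEq]; try constructor; all_goals first | trivial | omega)),
                      show limA r (j + 1) = 2 * r from by unfold limA; rw [if_neg (by omega), if_pos (by omega)],
                      show travA r (j + 1) = j - 4 * r + 1 from by unfold travA; rw [if_neg (by omega), if_neg (by omega), if_neg (by omega), if_pos (by omega)]; omega,
                      show rpB r (j + 1) = r from by unfold rpB; rw [if_neg (by omega)],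
                      show (2 * r - 1) ^ 2 + (j + 1) = (2 * r - 1) ^ 2 + j + 1 from by ring] at H
                  exact H
                ·
                  by_cases h7 : j < 6 * r - 1
                  ·
                    -- c6b: 4r < j < 6r-1 — DOWN along the left column, no turn
                    have hd : dirA r j = PyDir.DOWN := by unfold dirA; rw [if_neg h0, if_neg (by omega), if_neg (by omega), if_pos (by omega)]
                    have hp : posA r j = (-r, 5 * r - j) := by
                      unfold posA; rw [if_neg (by omega)]; unfold sideB; rw [if_neg (by omega), if_neg (by omega), if_pos (by omega)]; try first | rfl | (simp only [Prod.mk.injEq]; try constructor; all_goals first | trivial | omega)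
                    have hp1 : (posA r j).1 = -r := by rw [hp]
                    have hp2 : (posA r j).2 = 5 * r - j := by rw [hp]
                    have hl : limA r j = 2 * r := by unfold limA; rw [if_neg (by omega), if_pos (by omega)]
                    have ht : travA r j = j - 4 * r := by unfold travA; rw [if_neg h0, if_neg (by omega), if_neg (by omega), if_pos (by omega)]
                    have hs : sideB r j = (-r, 5 * r - 1 - j) := by unfold sideB; rw [if_neg (by omega), if_neg (by omega), if_pos (by omega)]
                    rw [hd, hp1, hp2, hl, ht]
                    simp only [runA]
                    rw [if_neg (by omega : ¬ (j - 4 * r + 1 ≥ 2 * r))]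
                    rw [show (stepB (rpB r j) ((2 * r - 1) ^ 2 + j)).2 = sideB r j from by
                          rw [stepB_eq r j hr hj0 hj8],
                        show (stepB (rpB r j) ((2 * r - 1) ^ 2 + j)).1 = r from by
                          rw [stepB_eq r j hr hj0 hj8],
                        hs]
                    refine congrArg₂ List.cons (by try first | rfl | (simp only [Prod.mk.injEq]; try constructor; all_goals first | trivial | omega)) ?_
                    have H := ih r (j + 1) (by omega) (by omega) (by omega)
                    rw [show dirA r (j + 1) = PyDir.DOWN from by unfold dirA; rw [if_neg (by omega), if_neg (by omega), if_neg (by omega), if_pos (by omega)],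
                        show posA r (j + 1) = (-r, 5 * r - j - 1) from by
                          unfold posA; rw [if_neg (by omega)]; unfold sideB; rw [if_neg (by omega), if_neg (by omega), if_pos (by omega)]; first | rfl | (try first | rfl | (simp only [Prod.mk.injEq]; try constructor; all_goals first | trivial | omega)),
                        show limA r (j + 1) = 2 * r from by unfold limA; rw [if_neg (by omega), if_pos (by omega)],
                        show travA r (j + 1) = j - 4 * r + 1 from by unfold travA; rw [if_neg (by omega), if_neg (by omega), if_neg (by omega), if_pos (by omega)]; omega,
                        show rpB r (j + 1) = r from by unfold rpB; rw [if_neg (by omega)],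
                        show (2 * r - 1) ^ 2 + (j + 1) = (2 * r - 1) ^ 2 + j + 1 from by ring] at H
                    exact H
                  ·
                    by_cases h8 : j = 6 * r - 1
                    ·
                      -- c7: j = 6r-1 — bottom of the left column; turn DOWN→RIGHT, limit grows
                      have hd : dirA r j = PyDir.DOWN := by unfold dirA; rw [if_neg h0, if_neg (by omega), if_neg (by omega), if_pos (by omega)]
                      have hp : posA r j = (-r, 5 * r - j) := by
                        unfold posA; rw [if_neg (by omega)]; unfold sideB; rw [if_neg (by omega), if_neg (by omega), if_pos (by omega)]; try first | rfl | (simp only [Prod.mk.injEq]; try constructor; all_goals first | trivial | omega)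
                      have hp1 : (posA r j).1 = -r := by rw [hp]
                      have hp2 : (posA r j).2 = 5 * r - j := by rw [hp]
                      have hl : limA r j = 2 * r := by unfold limA; rw [if_neg (by omega), if_pos (by omega)]
                      have ht : travA r j = j - 4 * r := by unfold travA; rw [if_neg h0, if_neg (by omega), if_neg (by omega), if_pos (by omega)]
                      have hs : sideB r j = (-r, 5 * r - 1 - j) := by unfold sideB; rw [if_neg (by omega), if_neg (by omega), if_pos (by omega)]
                      rw [hd, hp1, hp2, hl, ht]
                      simp only [runA]
                      rw [if_pos (by omega : j - 4 * r + 1 ≥ 2 * r)]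
                      simp only [pyUpdate]
                      rw [show (stepB (rpB r j) ((2 * r - 1) ^ 2 + j)).2 = sideB r j from by
                            rw [stepB_eq r j hr hj0 hj8],
                          show (stepB (rpB r j) ((2 * r - 1) ^ 2 + j)).1 = r from by
                            rw [stepB_eq r j hr hj0 hj8],
                          hs]
                      refine congrArg₂ List.cons (by try first | rfl | (simp only [Prod.mk.injEq]; try constructor; all_goals first | trivial | omega)) ?_
                      have H := ih r (j + 1) (by omega) (by omega) (by omega)
                      rw [show dirA r (j + 1) = PyDir.RIGHT from by unfold dirA; rw [if_neg (by omega), if_neg (by omega), if_neg (by omega), if_neg (by omega)],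
                          show posA r (j + 1) = (-r, 5 * r - j - 1) from by
                            unfold posA; rw [if_neg (by omega)]; unfold sideB; rw [if_neg (by omega), if_neg (by omega), if_pos (by omega)]; first | rfl | (try first | rfl | (simp only [Prod.mk.injEq]; try constructor; all_goals first | trivial | omega)),
                          show limA r (j + 1) = 2 * r + 1 from by unfold limA; rw [if_neg (by omega), if_neg (by omega)],
                          show travA r (j + 1) = 0 from by unfold travA; rw [if_neg (by omega), if_neg (by omega), if_neg (by omega), if_neg (by omega)]; omega,
                          show rpB r (j + 1) = r from by unfold rpB; rw [if_neg (by omega)],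
                          show (2 * r - 1) ^ 2 + (j + 1) = (2 * r - 1) ^ 2 + j + 1 from by ring] at H
                      exact H
                    ·
                      by_cases h9 : j = 6 * r
                      ·
                        -- c8a: j = 6r — first RIGHT step along the bottom row
                        have hd : dirA r j = PyDir.RIGHT := by unfold dirA; rw [if_neg h0, if_neg (by omega), if_neg (by omega), if_neg (by omega)]
                        have hp : posA r j = (-r, 5 * r - j) := by
                          unfold posA; rw [if_neg (by omega)]; unfold sideB; rw [if_neg (by omega), if_neg (by omega), if_pos (by omega)]; try first | rfl | (simp only [Prod.mk.injEq]; try constructor; all_goals first | trivial | omega)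
                        have hp1 : (posA r j).1 = -r := by rw [hp]
                        have hp2 : (posA r j).2 = 5 * r - j := by rw [hp]
                        have hl : limA r j = 2 * r + 1 := by unfold limA; rw [if_neg (by omega), if_neg (by omega)]
                        have ht : travA r j = j - 6 * r := by unfold travA; rw [if_neg h0, if_neg (by omega), if_neg (by omega), if_neg (by omega)]
                        have hs : sideB r j = (j - 7 * r + 1, -r) := by unfold sideB; rw [if_neg (by omega), if_neg (by omega), if_neg (by omega)]
                        rw [hd, hp1, hp2, hl, ht]
                        simp only [runA]
                        rw [if_neg (by omega : ¬ (j - 6 * r + 1 ≥ 2 * r + 1))]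
                        rw [show (stepB (rpB r j) ((2 * r - 1) ^ 2 + j)).2 = sideB r j from by
                              rw [stepB_eq r j hr hj0 hj8],
                            show (stepB (rpB r j) ((2 * r - 1) ^ 2 + j)).1 = r from by
                              rw [stepB_eq r j hr hj0 hj8],
                            hs]
                        refine congrArg₂ List.cons (by try first | rfl | (simp only [Prod.mk.injEq]; try constructor; all_goals first | trivial | omega)) ?_
                        have H := ih r (j + 1) (by omega) (by omega) (by omega)
                        rw [show dirA r (j + 1) = PyDir.RIGHT from by unfold dirA; rw [if_neg (by omega), if_neg (by omega), if_neg (by omega), if_neg (by omega)],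
                            show posA r (j + 1) = (-r + 1, 5 * r - j) from by
                              unfold posA; rw [if_neg (by omega)]; unfold sideB; rw [if_neg (by omega), if_neg (by omega), if_neg (by omega)]; first | rfl | (try first | rfl | (simp only [Prod.mk.injEq]; try constructor; all_goals first | trivial | omega)),
                            show limA r (j + 1) = 2 * r + 1 from by unfold limA; rw [if_neg (by omega), if_neg (by omega)],
                            show travA r (j + 1) = j - 6 * r + 1 from by unfold travA; rw [if_neg (by omega), if_neg (by omega), if_neg (by omega), if_neg (by omega)]; omega,
                            show rpB r (j + 1) = r from by unfold rpB; rw [if_neg (by omega)],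
                            show (2 * r - 1) ^ 2 + (j + 1) = (2 * r - 1) ^ 2 + j + 1 from by ring] at H
                        exact H
                      ·
                        by_cases h10 : j < 8 * r - 1
                        ·
                          -- c8b: 6r < j < 8r-1 — RIGHT along the bottom row, no turn
                          have hd : dirA r j = PyDir.RIGHT := by unfold dirA; rw [if_neg h0, if_neg (by omega), if_neg (by omega), if_neg (by omega)]
                          have hp : posA r j = (j - 7 * r, -r) := by
                            unfold posA; rw [if_neg (by omega)]; unfold sideB; rw [if_neg (by omega), if_neg (by omega), if_neg (by omega)]; try first | rfl | (simp only [Prod.mk.injEq]; try constructor; all_goals first | trivial | omega)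
                          have hp1 : (posA r j).1 = j - 7 * r := by rw [hp]
                          have hp2 : (posA r j).2 = -r := by rw [hp]
                          have hl : limA r j = 2 * r + 1 := by unfold limA; rw [if_neg (by omega), if_neg (by omega)]
                          have ht : travA r j = j - 6 * r := by unfold travA; rw [if_neg h0, if_neg (by omega), if_neg (by omega), if_neg (by omega)]
                          have hs : sideB r j = (j - 7 * r + 1, -r) := by unfold sideB; rw [if_neg (by omega), if_neg (by omega), if_neg (by omega)]
                          rw [hd, hp1, hp2, hl, ht]
                          simp only [runA]
                          rw [if_neg (by omega : ¬ (j - 6 * r + 1 ≥ 2 * r + 1))]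
                          rw [show (stepB (rpB r j) ((2 * r - 1) ^ 2 + j)).2 = sideB r j from by
                                rw [stepB_eq r j hr hj0 hj8],
                              show (stepB (rpB r j) ((2 * r - 1) ^ 2 + j)).1 = r from by
                                rw [stepB_eq r j hr hj0 hj8],
                              hs]
                          refine congrArg₂ List.cons (by try first | rfl | (simp only [Prod.mk.injEq]; try constructor; all_goals first | trivial | omega)) ?_
                          have H := ih r (j + 1) (by omega) (by omega) (by omega)
                          rw [show dirA r (j + 1) = PyDir.RIGHT from by unfold dirA; rw [if_neg (by omega), if_neg (by omega), if_neg (by omega), if_neg (by omega)],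
                              show posA r (j + 1) = (j - 7 * r + 1, -r) from by
                                unfold posA; rw [if_neg (by omega)]; unfold sideB; rw [if_neg (by omega), if_neg (by omega), if_neg (by omega)]; first | rfl | (try first | rfl | (simp only [Prod.mk.injEq]; try constructor; all_goals first | trivial | omega)),
                              show limA r (j + 1) = 2 * r + 1 from by unfold limA; rw [if_neg (by omega), if_neg (by omega)],
                              show travA r (j + 1) = j - 6 * r + 1 from by unfold travA; rw [if_neg (by omega), if_neg (by omega), if_neg (by omega), if_neg (by omega)]; omega,
                              show rpB r (j + 1) = r from by unfold rpB; rw [if_neg (by omega)],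
                              show (2 * r - 1) ^ 2 + (j + 1) = (2 * r - 1) ^ 2 + j + 1 from by ring] at H
                          exact H
                        ·
                          -- c9: j = 8r-1 — last index of ring r; the RIGHT segment continues into ring r+1
                          have hd : dirA r j = PyDir.RIGHT := by unfold dirA; rw [if_neg h0, if_neg (by omega), if_neg (by omega), if_neg (by omega)]
                          have hp : posA r j = (j - 7 * r, -r) := by
                            unfold posA; rw [if_neg (by omega)]; unfold sideB; rw [if_neg (by omega), if_neg (by omega), if_neg (by omega)]; try first | rfl | (simp only [Prod.mk.injEq]; try constructor; all_goals first | trivial | omega)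
                          have hp1 : (posA r j).1 = j - 7 * r := by rw [hp]
                          have hp2 : (posA r j).2 = -r := by rw [hp]
                          have hl : limA r j = 2 * r + 1 := by unfold limA; rw [if_neg (by omega), if_neg (by omega)]
                          have ht : travA r j = j - 6 * r := by unfold travA; rw [if_neg h0, if_neg (by omega), if_neg (by omega), if_neg (by omega)]
                          have hs : sideB r j = (j - 7 * r + 1, -r) := by unfold sideB; rw [if_neg (by omega), if_neg (by omega), if_neg (by omega)]
                          rw [hd, hp1, hp2, hl, ht]
                          simp only [runA]
                          rw [if_neg (by omega : ¬ (j - 6 * r + 1 ≥ 2 * r + 1))]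
                          rw [show (stepB (rpB r j) ((2 * r - 1) ^ 2 + j)).2 = sideB r j from by
                                rw [stepB_eq r j hr hj0 hj8],
                              show (stepB (rpB r j) ((2 * r - 1) ^ 2 + j)).1 = r from by
                                rw [stepB_eq r j hr hj0 hj8],
                              hs]
                          refine congrArg₂ List.cons (by try first | rfl | (simp only [Prod.mk.injEq]; try constructor; all_goals first | trivial | omega)) ?_
                          have H := ih (r + 1) (0) (by omega) (by omega) (by omega)
                          rw [show dirA (r + 1) (0) = PyDir.RIGHT from by unfold dirA; rw [if_pos rfl],
                              show posA (r + 1) (0) = (j - 7 * r + 1, -r) from by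
                                unfold posA; rw [if_pos rfl]; try first | rfl | (simp only [Prod.mk.injEq]; try constructor; all_goals first | trivial | omega),
                              show limA (r + 1) (0) = 2 * r + 1 from by unfold limA; rw [if_pos (by omega)]; omega,
                              show travA (r + 1) (0) = j - 6 * r + 1 from by unfold travA; rw [if_pos rfl]; omega,
                              show rpB (r + 1) (0) = r from by unfold rpB; rw [if_pos ⟨rfl, by omega⟩]; omega,
                              show (2 * (r + 1) - 1) ^ 2 + (0) = (2 * r - 1) ^ 2 + j + 1 from by rw [show j = 8 * r - 1 from by omega]; ring] at H
                          exact H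

-- ===== VERDICT (by name: the statement is the Claim_ definition above) =====
theorem positions_spec : Claim_equal_positions := by
  intro value _
  show positions value = positions_alt value
  rw [positions_char, positions_alt_char]
  have h := runAB (value - 1).toNat 1 0 (le_refl 1) (le_refl 0) (by norm_num)
  rw [show dirA 1 0 = PyDir.RIGHT from rfl, show posA 1 0 = (0, 0) from rfl,
    show limA 1 0 = 1 from rfl, show travA 1 0 = 0 from rfl,
    show rpB 1 0 = 1 from rfl, show (2 * 1 - 1 : Int) ^ 2 + 0 = 1 by norm_num] at h
  exact h
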